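-- pv_equiv track=rewrite | github.com/Yoheniy/competitive | leetcode_solution/sum-of-even-numbers-after-queries.py | sumEvenAfterQueries
-- ===== SOURCE A (Python) =====
-- from typing import List
--
-- def sumEvenAfterQueries(nums: List[int], queries: List[List[int]]) -> List[int]:
--     l=[]
--     total=sum(x for x in nums if x%2==0)
--     for el in queries:
--         temp=nums[el[1]]
--
--         if(temp%2==0 and el[0]%2==0):
--             nums[el[1]]+=el[0]
--             total+=el[0]
--             l.append(total)
--
--         elif(temp%2==0 and el[0]%2!=0):
--             nums[el[1]]+=el[0]
--             total-=temp
--             l.append(total)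
--         elif(temp%2!=0 and el[0]%2!=0):
--             nums[el[1]]+=el[0]
--             total+=el[0]+temp
--             l.append(total)
--         else:
--             nums[el[1]]+=el[0]
--
--             l.append(total)
--
--
--
--     return l
-- ===== SOURCE B (Python) =====
-- def sumEvenAfterQueries(nums, queries):
--     # Simpler: no maintained running total, no four-branch parity analysis;
--     # apply the update then recompute the even sum fresh each query.
--     l = []
--     for q in queries:
--         nums[q[1]] += q[0]
--         l.append(sum(x for x in nums if x % 2 == 0))
--     return l
-- ===== Notes on version B (the rewrite author's own statement) =====
-- stated objective: simpler
-- what changed: Replaces the maintained running total and the four-branch parity case analysis with a plain per-query rescan: apply nums[q[1]] += q[0], then recompute sum(x for x in nums if x % 2 == 0) and append it.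
import Mathlib
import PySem

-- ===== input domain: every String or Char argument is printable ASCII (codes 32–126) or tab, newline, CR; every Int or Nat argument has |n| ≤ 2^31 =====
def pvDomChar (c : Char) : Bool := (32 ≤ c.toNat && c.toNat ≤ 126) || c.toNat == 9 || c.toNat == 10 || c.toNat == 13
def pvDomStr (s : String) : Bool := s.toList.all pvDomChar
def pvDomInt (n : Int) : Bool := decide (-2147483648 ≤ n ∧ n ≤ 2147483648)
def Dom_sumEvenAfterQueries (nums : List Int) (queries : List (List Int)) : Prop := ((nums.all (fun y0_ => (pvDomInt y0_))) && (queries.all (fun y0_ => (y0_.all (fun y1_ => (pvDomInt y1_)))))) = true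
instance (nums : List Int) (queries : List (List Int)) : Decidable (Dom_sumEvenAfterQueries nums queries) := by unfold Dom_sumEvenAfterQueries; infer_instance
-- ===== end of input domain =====

-- ===== PORT A =====
-- B recomputes the even sum per query instead of A's maintained total with four parity branches (objective: simpler).
-- Both Pythons mutate `nums` in place via `nums[i] += v`; the equivalence proved here is about the RETURN value.
-- Loop of A: for each query el, temp = nums[el[1]], four parity branches updating nums, total, l.
def pvALoop (nums : List Int) (total : Int) (qs : List (List Int)) : List Int :=
  match qs with
  | [] => []
  | el :: rest =>
    let temp := PySem.List.pyGetD nums (PySem.List.pyGetD el 1 0) 0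
    let nums' := PySem.List.pySetD nums (PySem.List.pyGetD el 1 0) (temp + PySem.List.pyGetD el 0 0)
    if PySem.Int.mod temp 2 == 0 && PySem.Int.mod (PySem.List.pyGetD el 0 0) 2 == 0 then
      let total' := total + PySem.List.pyGetD el 0 0
      total' :: pvALoop nums' total' rest
    else if PySem.Int.mod temp 2 == 0 && !(PySem.Int.mod (PySem.List.pyGetD el 0 0) 2 == 0) then
      let total' := total - temp
      total' :: pvALoop nums' total' rest
    else if !(PySem.Int.mod temp 2 == 0) && !(PySem.Int.mod (PySem.List.pyGetD el 0 0) 2 == 0) then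
      let total' := total + PySem.List.pyGetD el 0 0 + temp
      total' :: pvALoop nums' total' rest
    else
      total :: pvALoop nums' total rest

def sumEvenAfterQueries (nums : List Int) (queries : List (List Int)) : List Int :=
  pvALoop nums ((nums.filter (fun x => PySem.Int.mod x 2 == 0)).sum) queries

-- ===== PORT B =====
-- sum(x for x in nums if x % 2 == 0)
def pvEvenSum (ns : List Int) : Int :=
  (ns.filter (fun x => PySem.Int.mod x 2 == 0)).sum

def pvBLoop (nums : List Int) (qs : List (List Int)) : List Int :=
  match qs with
  | [] => []
  | q :: rest =>
    let nums' := PySem.List.pySetD nums (PySem.List.pyGetD q 1 0)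
        (PySem.List.pyGetD nums (PySem.List.pyGetD q 1 0) 0 + PySem.List.pyGetD q 0 0)
    pvEvenSum nums' :: pvBLoop nums' rest

def sumEvenAfterQueries_alt (nums : List Int) (queries : List (List Int)) : List Int :=
  pvBLoop nums queries

-- ===== PRECONDITION & SPEC =====
-- Pre_ excludes exactly the inputs where A raises IndexError: a query shorter than 2 elements
-- (el[1] fails) or an update index outside Python's valid (possibly negative) range for nums.
def Pre_sumEvenAfterQueries (nums : List Int) (queries : List (List Int)) : Prop :=
  ∀ q ∈ queries, 2 ≤ q.length ∧ PySem.Raise.InRange nums.length (PySem.List.pyGetD q 1 0)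
instance (nums : List Int) (queries : List (List Int)) : Decidable (Pre_sumEvenAfterQueries nums queries) := by
  unfold Pre_sumEvenAfterQueries PySem.Raise.InRange; infer_instance
def pvWitness_sumEvenAfterQueries : List Int × List (List Int) := ([1, 2, 3, 4], [[1, 0], [-3, 1], [-4, 0], [2, 3]])

def Spec_sumEvenAfterQueries (nums : List Int) (queries : List (List Int)) (out : List Int) : Prop := out = sumEvenAfterQueries_alt nums queries
instance (nums : List Int) (queries : List (List Int)) (out : List Int) : Decidable (Spec_sumEvenAfterQueries nums queries out) := by unfold Spec_sumEvenAfterQueries; infer_instance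

-- ===== CLAIM (what is proved, stated in full; the proofs are below) =====
def Claim_equal_sumEvenAfterQueries : Prop := ∀ (nums : List Int) (queries : List (List Int)), Dom_sumEvenAfterQueries nums queries → Pre_sumEvenAfterQueries nums queries → Spec_sumEvenAfterQueries nums queries (sumEvenAfterQueries nums queries)

-- ===== LEMMAS AND PROOFS =====

lemma pvIdx_of_inRange (n : Nat) (i : Int) (h : PySem.Raise.InRange n i) :
    ∃ j : Nat, PySem.List.pyIdx? n i = some j ∧ j < n := by
  obtain ⟨h1, h2⟩ := h
  unfold PySem.List.pyIdx?
  by_cases h0 : 0 ≤ i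
  · exact ⟨i.toNat, by simp [h0, h2], by omega⟩
  · exact ⟨n - (-i).toNat, by simp [h0, h1], by omega⟩

lemma pv_get_set (xs : List Int) (i v : Int) (h : PySem.Raise.InRange xs.length i) :
    ∃ j : Nat, ∃ hj : j < xs.length,
      PySem.List.pyGetD xs i 0 = xs[j] ∧ PySem.List.pySetD xs i v = xs.set j v := by
  obtain ⟨j, hidx, hj⟩ := pvIdx_of_inRange xs.length i h
  refine ⟨j, hj, ?_, ?_⟩
  · simp [PySem.List.pyGetD, PySem.List.pyGet?, hidx, List.getElem?_eq_getElem hj]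
  · simp [PySem.List.pySetD, PySem.List.pySet?, hidx]

lemma pvEvenSum_cons (a : Int) (as : List Int) :
    pvEvenSum (a :: as) = (if PySem.Int.mod a 2 = 0 then a else 0) + pvEvenSum as := by
  simp [pvEvenSum, List.filter_cons]
  split_ifs <;> simp

lemma pvEvenSum_set (xs : List Int) (j : Nat) (hj : j < xs.length) (w : Int) :
    pvEvenSum (xs.set j w) + (if PySem.Int.mod xs[j] 2 = 0 then xs[j] else 0)
      = pvEvenSum xs + (if PySem.Int.mod w 2 = 0 then w else 0) := by
  induction xs generalizing j with
  | nil => simp at hj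
  | cons a as ih =>
    cases j with
    | zero => simp [pvEvenSum_cons]; ring
    | succ j =>
      simp only [List.set_cons_succ, pvEvenSum_cons, List.getElem_cons_succ]
      have := ih j (by simpa using hj)
      linarith

lemma pvTotal_step (xs : List Int) (j : Nat) (hj : j < xs.length) (v : Int) :
    (if PySem.Int.mod xs[j] 2 = 0 then
       (if PySem.Int.mod v 2 = 0 then pvEvenSum xs + v else pvEvenSum xs - xs[j])
     else
       (if PySem.Int.mod v 2 = 0 then pvEvenSum xs else pvEvenSum xs + v + xs[j]))
      = pvEvenSum (xs.set j (xs[j] + v)) := by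
  have hset := pvEvenSum_set xs j hj (xs[j] + v)
  simp only [PySem.Int.mod_eq_zero_iff_dvd] at hset ⊢
  split_ifs at hset ⊢ <;> omega

lemma pv_loop (qs : List (List Int)) : ∀ (xs : List Int) (total : Int),
    (∀ q ∈ qs, 2 ≤ q.length ∧ PySem.Raise.InRange xs.length (PySem.List.pyGetD q 1 0)) →
    total = pvEvenSum xs → pvALoop xs total qs = pvBLoop xs qs := by
  induction qs with
  | nil => intro xs total _ _; rfl
  | cons q rest ih =>
    intro xs total hPre htot
    obtain ⟨hq, hrange⟩ := hPre q (by simp)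
    obtain ⟨j, hj, hget, hset⟩ :=
      pv_get_set xs (PySem.List.pyGetD q 1 0)
        (PySem.List.pyGetD xs (PySem.List.pyGetD q 1 0) 0 + PySem.List.pyGetD q 0 0) hrange
    have hpre' : ∀ r ∈ rest, 2 ≤ r.length ∧
        PySem.Raise.InRange (xs.set j (xs[j] + PySem.List.pyGetD q 0 0)).length
          (PySem.List.pyGetD r 1 0) := by
      intro r hr
      have := hPre r (by simp [hr])
      simpa using this
    have hstep := pvTotal_step xs j hj (PySem.List.pyGetD q 0 0)
    unfold pvALoop pvBLoop
    rw [hget] at hset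
    simp only [hget, hset]
    subst htot
    split_ifs with h1 h2 h3
    · simp only [Bool.and_eq_true, beq_iff_eq] at h1
      rw [if_pos h1.1, if_pos h1.2] at hstep
      rw [hstep]
      exact congrArg _ (ih _ _ hpre' rfl)
    · simp only [Bool.and_eq_true, beq_iff_eq, Bool.not_eq_true', beq_eq_false_iff_ne, ne_eq] at h2
      rw [if_pos h2.1, if_neg h2.2] at hstep
      rw [hstep]
      exact congrArg _ (ih _ _ hpre' rfl)
    · simp only [Bool.and_eq_true, Bool.not_eq_true', beq_eq_false_iff_ne, ne_eq] at h3
      rw [if_neg h3.1, if_neg h3.2] at hstep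
      rw [hstep]
      exact congrArg _ (ih _ _ hpre' rfl)
    · simp only [Bool.and_eq_true, beq_iff_eq, Bool.not_eq_true', beq_eq_false_iff_ne, ne_eq,
        not_and] at h1 h2 h3
      have ht : ¬ PySem.Int.mod xs[j] 2 = 0 := by tauto
      have hv : PySem.Int.mod (PySem.List.pyGetD q 0 0) 2 = 0 := by tauto
      rw [if_neg ht, if_pos hv] at hstep
      rw [hstep]
      exact congrArg _ (ih _ _ hpre' rfl)


-- ===== VERDICT (by name: the statement is the Claim_ definition above) =====
theorem sumEvenAfterQueries_spec : Claim_equal_sumEvenAfterQueries := by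
  intro nums queries _ hPre
  unfold Spec_sumEvenAfterQueries sumEvenAfterQueries sumEvenAfterQueries_alt
  exact pv_loop queries nums _ hPre rfl
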